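-- pv_equiv track=rewrite | github.com/evgenydarkhanov/self_algorithms_and_data_structures | 05_trees/069_tree_minimax.py | tree_min_max
-- ===== SOURCE A (Python) =====
-- from typing import List
--
-- def tree_min_max(tree: List[int]) -> int:
--     n = len(tree)
--     if n == 2:
--         return tree[0] * tree[1]
--
--     l, r = 0, 0
--
--     while l < n:
--         l = 2 * l + 1
--     l = (l - 1) // 2
--
--     while r < n:
--         r = 2 * r + 2
--     r = (r - 1) // 2
--
--     return tree[l] * tree[r]
-- ===== SOURCE B (Python) =====
-- def tree_min_max(tree):
--     n = len(tree)
--     l = ((1 << n.bit_length()) - 2) // 2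
--     r = ((1 << (n + 1).bit_length()) - 3) // 2
--     return tree[l] * tree[r]
-- ===== Notes on version B (the rewrite author's own statement) =====
-- stated objective: simpler
-- what changed: Replaces both doubling while-loops (and the n==2 special case) with closed-form bit_length formulas for the last-left and last-right indices.
import Mathlib
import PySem

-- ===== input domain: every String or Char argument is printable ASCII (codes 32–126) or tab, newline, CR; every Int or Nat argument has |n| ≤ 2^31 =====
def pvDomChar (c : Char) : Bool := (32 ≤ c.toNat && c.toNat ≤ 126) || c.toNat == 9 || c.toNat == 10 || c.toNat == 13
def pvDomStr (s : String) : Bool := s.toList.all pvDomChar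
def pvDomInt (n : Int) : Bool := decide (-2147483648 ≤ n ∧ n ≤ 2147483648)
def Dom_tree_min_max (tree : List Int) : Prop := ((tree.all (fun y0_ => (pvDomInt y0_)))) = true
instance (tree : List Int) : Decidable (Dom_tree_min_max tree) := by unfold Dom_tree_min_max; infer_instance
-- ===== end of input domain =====

-- B replaces A's two doubling while-loops (and the n==2 special case) with closed-form
-- bit-length formulas for the same two indices; objective: simpler.

-- ===== PORT A =====
-- A's first while loop: l = 2*l+1 while l < n (values stay nonnegative, so Nat state)
def pvGrowL (n l : Nat) : Nat :=
  if l < n then pvGrowL n (2 * l + 1) else l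
  termination_by n - l
  decreasing_by omega

-- A's second while loop: r = 2*r+2 while r < n
def pvGrowR (n r : Nat) : Nat :=
  if r < n then pvGrowR n (2 * r + 2) else r
  termination_by n - r
  decreasing_by omega

def tree_min_max (tree : List Int) : Int :=
  let n := tree.length
  if n = 2 then
    (PySem.List.pyGet? tree 0).getD 0 * (PySem.List.pyGet? tree 1).getD 0
  else
    let l := PySem.Int.floordiv ((pvGrowL n 0 : Int) - 1) 2
    let r := PySem.Int.floordiv ((pvGrowR n 0 : Int) - 1) 2
    (PySem.List.pyGet? tree l).getD 0 * (PySem.List.pyGet? tree r).getD 0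

-- ===== PORT B =====
-- n.bit_length() is Nat.size n; 1 << k is 1 <<< k; subtraction is done in Int as in Python
def tree_min_max_alt (tree : List Int) : Int :=
  let n := tree.length
  let l := PySem.Int.floordiv (((1 <<< Nat.size n : Nat) : Int) - 2) 2
  let r := PySem.Int.floordiv (((1 <<< Nat.size (n + 1) : Nat) : Int) - 3) 2
  (PySem.List.pyGet? tree l).getD 0 * (PySem.List.pyGet? tree r).getD 0

-- ===== PRECONDITION & SPEC =====
-- Pre_ excludes only the empty list, on which A (and B) raise IndexError from a negative index.
def Pre_tree_min_max (tree : List Int) : Prop := tree ≠ []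
instance (tree : List Int) : Decidable (Pre_tree_min_max tree) := by unfold Pre_tree_min_max; infer_instance
def pvWitness_tree_min_max : List Int := [3, -4, 5]

def Spec_tree_min_max (tree : List Int) (out : Int) : Prop := out = tree_min_max_alt tree
instance (tree : List Int) (out : Int) : Decidable (Spec_tree_min_max tree out) := by unfold Spec_tree_min_max; infer_instance

-- ===== CLAIM (what is proved, stated in full; the proofs are below) =====
def Claim_equal_tree_min_max : Prop := ∀ (tree : List Int), Dom_tree_min_max tree → Pre_tree_min_max tree → Spec_tree_min_max tree (tree_min_max tree)

-- ===== LEMMAS AND PROOFS =====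

-- A's left loop, started at 2^k - 1 with 2^k ≤ n, ends at 2^(n.size) - 1
lemma pvGrowL_closed (n : Nat) : ∀ d k, n.size - k ≤ d → 2 ^ k ≤ n →
    pvGrowL n (2 ^ k - 1) = 2 ^ n.size - 1 := by
  intro d
  induction d with
  | zero =>
      intro k hd hk
      have hks : k < n.size := Nat.lt_size.mpr hk
      omega
  | succ d ih =>
      intro k hd hk
      have h1 : 2 ^ k - 1 < n := by have := Nat.one_le_two_pow (n := k); omega
      rw [pvGrowL, if_pos h1]
      have hstep : 2 * (2 ^ k - 1) + 1 = 2 ^ (k + 1) - 1 := by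
        have := Nat.one_le_two_pow (n := k)
        have : 2 ^ (k + 1) = 2 * 2 ^ k := by ring
        omega
      rw [hstep]
      by_cases h2 : 2 ^ (k + 1) ≤ n
      · have hks : k < n.size := Nat.lt_size.mpr hk
        exact ih (k + 1) (by omega) h2
      · have hsz : n.size = k + 1 := by
          have h3 : n.size ≤ k + 1 := Nat.size_le.mpr (by omega)
          have h4 : k < n.size := Nat.lt_size.mpr hk
          omega
        rw [pvGrowL, if_neg (by omega), hsz]

-- A's right loop, started at 2^k - 2 with 1 ≤ k and 2^k ≤ n + 1, ends at 2^((n+1).size) - 2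
lemma pvGrowR_closed (n : Nat) : ∀ d k, (n + 1).size - k ≤ d → 1 ≤ k → 2 ^ k ≤ n + 1 →
    pvGrowR n (2 ^ k - 2) = 2 ^ (n + 1).size - 2 := by
  intro d
  induction d with
  | zero =>
      intro k hd hk1 hk
      have hks : k < (n + 1).size := Nat.lt_size.mpr hk
      omega
  | succ d ih =>
      intro k hd hk1 hk
      have hpow : 2 ≤ 2 ^ k := by
        calc 2 = 2 ^ 1 := rfl
        _ ≤ 2 ^ k := Nat.pow_le_pow_right (by omega) hk1
      have h1 : 2 ^ k - 2 < n := by omega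
      rw [pvGrowR, if_pos h1]
      have hstep : 2 * (2 ^ k - 2) + 2 = 2 ^ (k + 1) - 2 := by
        have : 2 ^ (k + 1) = 2 * 2 ^ k := by ring
        omega
      rw [hstep]
      by_cases h2 : 2 ^ (k + 1) ≤ n + 1
      · have hks : k < (n + 1).size := Nat.lt_size.mpr hk
        exact ih (k + 1) (by omega) (by omega) h2
      · have hsz : (n + 1).size = k + 1 := by
          have h3 : (n + 1).size ≤ k + 1 := Nat.size_le.mpr (by omega)
          have h4 : k < (n + 1).size := Nat.lt_size.mpr hk
          omega
        have hpow1 : 2 ≤ 2 ^ (k + 1) := by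
          calc 2 = 2 ^ 1 := rfl
          _ ≤ 2 ^ (k + 1) := Nat.pow_le_pow_right (by omega) (by omega)
        rw [pvGrowR, if_neg (by omega), hsz]

lemma pvGrowL_zero (n : Nat) (hn : 1 ≤ n) : pvGrowL n 0 = 2 ^ n.size - 1 := by
  have := pvGrowL_closed n n.size 0 (by omega) (by simpa using hn)
  simpa using this

lemma pvGrowR_zero (n : Nat) (hn : 1 ≤ n) : pvGrowR n 0 = 2 ^ (n + 1).size - 2 := by
  have := pvGrowR_closed n (n + 1).size 1 (by omega) (le_refl 1) (by omega)
  simpa using this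

lemma pv_shift_eq (k : Nat) : ((1 <<< k : Nat) : Int) = ((2 ^ k : Nat) : Int) := by
  norm_num [Nat.shiftLeft_eq]

-- ===== VERDICT (by name: the statement is the Claim_ definition above) ===== (by name: the statement is the Claim_ definition above) =====
theorem tree_min_max_spec : Claim_equal_tree_min_max := by
  intro tree _ hpre
  unfold Spec_tree_min_max tree_min_max tree_min_max_alt
  dsimp only
  have hn : 1 ≤ tree.length := by
    cases tree with
    | nil => exact absurd rfl hpre
    | cons a t => simp
  rw [pvGrowL_zero _ hn, pvGrowR_zero _ hn, pv_shift_eq, pv_shift_eq]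
  by_cases h2 : tree.length = 2
  · -- A's n == 2 branch: tree = [a, b]; B computes tree[1] * tree[0]
    match tree, h2 with
    | [a, b], _ =>
      have hs2 : Nat.size 2 = 2 := by decide
      have hs3 : Nat.size 3 = 2 := by decide
      have hf : Int.fdiv 1 2 = 0 := by decide
      norm_num [hs2, hs3, hf, PySem.List.pyGet?, PySem.List.pyIdx?, PySem.Int.floordiv]
      ring
  · rw [if_neg h2]
    have hL : ((2 ^ tree.length.size - 1 : Nat) : Int) - 1
        = ((2 ^ tree.length.size : Nat) : Int) - 2 := by
      have := Nat.one_le_two_pow (n := tree.length.size)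
      push_cast [this]
      ring
    have hR : ((2 ^ (tree.length + 1).size - 2 : Nat) : Int) - 1
        = ((2 ^ (tree.length + 1).size : Nat) : Int) - 3 := by
      have h1 : 1 ≤ (tree.length + 1).size := Nat.lt_size.mpr (by simpa using hn)
      have h2 : 2 ≤ 2 ^ (tree.length + 1).size := by
        calc 2 = 2 ^ 1 := rfl
        _ ≤ 2 ^ (tree.length + 1).size := Nat.pow_le_pow_right (by omega) h1
      push_cast [h2]
      ring
    rw [hL, hR]
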